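-- pv_equiv track=rewrite | github.com/AtillaYasar/NAI-attg-exploration | scripts.py | sortByValues
-- ===== SOURCE A (Python) =====
-- def sortByValues(d):
--     #no dependencies
--
--     l = {}
--     for k,v in d.items():
--         if v not in l:
--             l[v] = []
--         l[v].append(k)
--     l = {k:l[k] for k in sorted(l.keys(), reverse=True)}
--
--     dSorted = {}
--     for number, keys in l.items():
--         for key in keys:
--             dSorted[key] = number
--
--     return dSorted
-- ===== SOURCE B (Python) =====
-- def sortByValues(d):
--     return dict(sorted(d.items(), key=lambda kv: kv[1], reverse=True))
-- ===== Notes on version B (the rewrite author's own statement) =====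
-- stated objective: simpler
-- what changed: Replaces A's two-phase value->keys bucket table (group, sort the distinct values, then re-flatten through a second dict) by a single stable sort of the items by value descending, relying on sort stability to preserve insertion order among equal values.
import Mathlib
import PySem

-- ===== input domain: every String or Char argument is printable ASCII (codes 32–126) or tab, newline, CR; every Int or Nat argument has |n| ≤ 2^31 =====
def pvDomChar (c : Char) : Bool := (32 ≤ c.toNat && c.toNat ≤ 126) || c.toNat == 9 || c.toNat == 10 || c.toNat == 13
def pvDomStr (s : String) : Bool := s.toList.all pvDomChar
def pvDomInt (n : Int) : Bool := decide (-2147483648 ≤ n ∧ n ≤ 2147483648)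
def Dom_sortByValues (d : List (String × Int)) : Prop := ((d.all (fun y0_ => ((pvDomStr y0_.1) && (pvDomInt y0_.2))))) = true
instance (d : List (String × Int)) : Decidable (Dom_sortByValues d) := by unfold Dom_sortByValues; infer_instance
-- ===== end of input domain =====

-- B replaces A's value→keys bucket table and two-phase re-flatten by one stable sort of
-- the items by value descending (objective: simpler).
-- The input dict is the association list d read with Python's dict semantics
-- (PySem.Dict.ofList: a repeated key keeps its first position, last value).

-- ===== PORT A =====
-- A: group keys by value in a dict l, rebuild l with its keys sorted descending,
-- then write key→value pairs bucket by bucket into dSorted.  'l[k]' in the dict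
-- comprehension is ported as 'getD k []' — exact, since k ranges over l's own keys.
def sortByValues (d : List (String × Int)) : List (String × Int) :=
  let items := (PySem.Dict.ofList d).items
  let l : PySem.Dict Int (List String) :=
    items.foldl (fun l kv =>
      let l' := if l.contains kv.2 then l else l.insert kv.2 ([] : List String)
      l'.modify kv.2 [] (fun ks => ks ++ [kv.1])) PySem.Dict.empty
  let l2 : PySem.Dict Int (List String) :=
    (PySem.List.sorted l.keys (fun x => x) true).foldl
      (fun acc k => acc.insert k (l.getD k [])) PySem.Dict.empty
  let dSorted : PySem.Dict String Int :=
    l2.items.foldl (fun ds p => p.2.foldl (fun ds key => ds.insert key p.1) ds) PySem.Dict.empty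
  dSorted.items

-- ===== PORT B =====
-- B: dict(sorted(d.items(), key=lambda kv: kv[1], reverse=True))
def sortByValues_alt (d : List (String × Int)) : List (String × Int) :=
  (PySem.Dict.ofList
    (PySem.List.sorted (PySem.Dict.ofList d).items (fun kv => kv.2) true)).items

-- ===== PRECONDITION & SPEC =====
def Spec_sortByValues (d : List (String × Int)) (out : List (String × Int)) : Prop := out = sortByValues_alt d
instance (d : List (String × Int)) (out : List (String × Int)) : Decidable (Spec_sortByValues d out) := by unfold Spec_sortByValues; infer_instance

-- ===== CLAIM (what is proved, stated in full; the proofs are below) =====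
def Claim_equal_sortByValues : Prop := ∀ (d : List (String × Int)), Dom_sortByValues d → Spec_sortByValues d (sortByValues d)

-- ===== LEMMAS AND PROOFS =====

theorem pv_flatMap_congr_mem {α β : Type} (l : List α) (f g : α → List β)
    (h : ∀ x ∈ l, f x = g x) : l.flatMap f = l.flatMap g := by
  induction l with
  | nil => rfl
  | cons x t ih =>
      simp only [List.flatMap_cons, h x (by simp), ih (fun y hy => h y (by simp [hy]))]

theorem pv_insertBy_cons {α : Type} (before : α → α → Bool) (x y : α) (ys : List α) :
    PySem.List.insertBy before x (y :: ys) =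
      if before x y then x :: y :: ys else y :: PySem.List.insertBy before x ys := by
  cases hb : before x y <;> simp [PySem.List.insertBy, hb]

theorem pv_insertBy_append_not_before {α : Type} (before : α → α → Bool) (x : α)
    (pre rest : List α) (h : ∀ y ∈ pre, before x y = false) :
    PySem.List.insertBy before x (pre ++ rest) = pre ++ PySem.List.insertBy before x rest := by
  induction pre with
  | nil => rfl
  | cons y t ih =>
      rw [List.cons_append, pv_insertBy_cons, if_neg (by simp [h y (by simp)]),
        ih (fun z hz => h z (by simp [hz]))]
      simp

theorem pv_insertBy_all_before {α : Type} (before : α → α → Bool) (x : α)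
    (L : List α) (h : ∀ y ∈ L, before x y = true) :
    PySem.List.insertBy before x L = x :: L := by
  cases L with
  | nil => rfl
  | cons y t => rw [pv_insertBy_cons, if_pos (h y (by simp))]

-- inserting one item into the bucket decomposition: it lands at the end of its
-- value's bucket (or opens a fresh bucket at the right place).
theorem pv_insertBy_flatMap_buckets (vs : List Int) (hvs : vs.Pairwise (· > ·))
    (g : Int → List (String × Int)) (hg : ∀ w : Int, ∀ y ∈ g w, y.2 = w)
    (x : String × Int) :
    PySem.List.insertBy (fun a b => decide (b.2 < a.2)) x (vs.flatMap g) =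
      if x.2 ∈ vs then
        vs.flatMap (fun w => if w = x.2 then g w ++ [x] else g w)
      else
        (PySem.List.insertBy (fun a b => decide (b < a)) x.2 vs).flatMap
          (fun w => if w = x.2 then [x] else g w) := by
  induction vs with
  | nil => simp [PySem.List.insertBy]
  | cons w vs ih =>
      have hw : ∀ u ∈ vs, u < w := by
        intro u hu; exact (List.pairwise_cons.1 hvs).1 u hu
      have hvs' : vs.Pairwise (· > ·) := (List.pairwise_cons.1 hvs).2
      rcases lt_trichotomy x.2 w with hlt | heq | hgt
      · -- x.2 < w : skip w's bucket, recurse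
        have hne : x.2 ≠ w := by omega
        have h1 : PySem.List.insertBy (fun a b => decide (b.2 < a.2)) x ((w :: vs).flatMap g) =
            g w ++ PySem.List.insertBy (fun a b => decide (b.2 < a.2)) x (vs.flatMap g) := by
          rw [List.flatMap_cons]
          exact pv_insertBy_append_not_before _ _ _ _
            (fun y hy => by
              have h2 := hg w y hy
              simp only [h2, decide_eq_false_iff_not, not_lt]
              omega)
        rw [h1, ih hvs']
        by_cases hx : x.2 ∈ vs
        · rw [if_pos hx, if_pos (List.mem_cons.2 (Or.inr hx)), List.flatMap_cons,
            if_neg (fun h => hne h.symm)]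
        · have hx2 : x.2 ∉ w :: vs := by
            simp only [List.mem_cons, not_or]
            exact ⟨hne, hx⟩
          rw [if_neg hx, if_neg hx2, pv_insertBy_cons,
            if_neg (by simp; omega),
            List.flatMap_cons, if_neg (fun h => hne h.symm)]
      · -- x.2 = w : append to w's bucket
        have hmem : x.2 ∈ w :: vs := by simp [heq]
        have h1 : PySem.List.insertBy (fun a b => decide (b.2 < a.2)) x ((w :: vs).flatMap g) =
            g w ++ (x :: vs.flatMap g) := by
          rw [List.flatMap_cons,
            pv_insertBy_append_not_before _ _ _ _
              (fun y hy => by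
                have h2 := hg w y hy
                simp only [h2, heq, decide_eq_false_iff_not, not_lt]
                omega),
            pv_insertBy_all_before _ _ _
              (fun y hy => by
                rcases List.mem_flatMap.1 hy with ⟨u, hu, hyu⟩
                have h2 := hg u y hyu
                have h3 := hw u hu
                simp only [h2, decide_eq_true_eq]
                omega)]
        have h2 : (w :: vs).flatMap (fun u => if u = x.2 then g u ++ [x] else g u) =
            (g w ++ [x]) ++ vs.flatMap g := by
          rw [List.flatMap_cons, if_pos heq.symm,
            pv_flatMap_congr_mem vs _ g
              (fun u hu => if_neg (by have := hw u hu; omega))]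
        rw [if_pos hmem, h1, h2, List.append_assoc, List.singleton_append]
      · -- x.2 > w : x goes in front of everything
        have hx2 : x.2 ∉ w :: vs := by
          simp only [List.mem_cons, not_or]
          exact ⟨by omega, fun h => by have := hw _ h; omega⟩
        have h1 : PySem.List.insertBy (fun a b => decide (b.2 < a.2)) x ((w :: vs).flatMap g) =
            x :: (w :: vs).flatMap g :=
          pv_insertBy_all_before _ _ _
            (fun y hy => by
              rcases List.mem_flatMap.1 hy with ⟨u, hu, hyu⟩
              have h2 := hg u y hyu
              have h3 : u ≤ w := by
                rcases List.mem_cons.1 hu with h | h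
                · omega
                · have := hw u h; omega
              simp only [h2, decide_eq_true_eq]
              omega)
        have h2 : PySem.List.insertBy (fun a b => decide (b < a)) x.2 (w :: vs) =
            x.2 :: w :: vs := by
          rw [pv_insertBy_cons, if_pos (by simp; omega)]
        have h3 : (x.2 :: w :: vs).flatMap (fun u => if u = x.2 then [x] else g u) =
            x :: (w :: vs).flatMap g := by
          rw [List.flatMap_cons, if_pos rfl, List.flatMap_cons,
            if_neg (by omega),
            pv_flatMap_congr_mem vs _ g
              (fun u hu => if_neg (by have := hw u hu; omega))]
          simp
        rw [if_neg hx2, h1, h2, h3]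

-- descending sort of a duplicate-free list is strictly decreasing
theorem pv_sorted_desc_strict (s : List Int) (h : s.Nodup) :
    (PySem.List.sorted s (fun v => v) true).Pairwise (· > ·) := by
  have h1 := PySem.List.sorted_pairwise_rev s (fun v => v)
  have h2 : (PySem.List.sorted s (fun v => v) true).Nodup :=
    ((PySem.List.sorted_perm s (fun v => v) true).nodup_iff).2 h
  exact (h1.and h2).imp (fun {a b} ⟨hle, hne⟩ => lt_of_le_of_ne hle (fun he => hne he.symm))

-- THE stable-sort characterisation: sorting pairs by value descending equals
-- concatenating, over the distinct values sorted descending, the original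
-- sublists of pairs carrying that value.
theorem pv_stable_buckets (xs : List (String × Int)) :
    PySem.List.sorted xs (fun kv => kv.2) true =
      (PySem.List.sorted (PySem.Set.ofList (xs.map (fun kv => kv.2))) (fun v => v) true).flatMap
        (fun v => xs.filter (fun kv => kv.2 == v)) := by
  induction xs using List.reverseRecOn with
  | nil => rfl
  | append_singleton xs x ih =>
      have hg : ∀ w : Int, ∀ y ∈ xs.filter (fun kv => kv.2 == w), y.2 = w := by
        intro w y hy
        simpa using (List.of_mem_filter hy)
      have hvs := pv_sorted_desc_strict (PySem.Set.ofList (xs.map (fun kv => kv.2)))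
        (PySem.Set.nodup_ofList _)
      rw [PySem.List.sorted_rev_eq_foldl_insertBy, List.foldl_append, List.foldl_cons,
        List.foldl_nil, ← PySem.List.sorted_rev_eq_foldl_insertBy, ih,
        pv_insertBy_flatMap_buckets _ hvs _ hg x]
      have hofl : PySem.Set.ofList ((xs ++ [x]).map (fun kv => kv.2)) =
          PySem.Set.add (PySem.Set.ofList (xs.map (fun kv => kv.2))) x.2 := by
        rw [PySem.Set.ofList_eq_foldl, PySem.Set.ofList_eq_foldl, List.map_append,
          List.foldl_append]
        rfl
      by_cases hx : x.2 ∈ PySem.Set.ofList (xs.map (fun kv => kv.2))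
      · rw [if_pos ((PySem.List.mem_sorted _ _ _ _).2 hx)]
        have hset : PySem.Set.ofList ((xs ++ [x]).map (fun kv => kv.2)) =
            PySem.Set.ofList (xs.map (fun kv => kv.2)) := by
          rw [hofl]
          unfold PySem.Set.add
          rw [if_pos (by simpa [PySem.Set.contains, List.contains_iff_mem] using hx)]
        rw [hset]
        refine pv_flatMap_congr_mem _ _ _ (fun w _ => ?_)
        by_cases hwv : w = x.2
        · rw [if_pos hwv, List.filter_append, hwv]
          simp
        · rw [if_neg hwv, List.filter_append]
          simp [Ne.symm hwv]
      · rw [if_neg (fun h => hx ((PySem.List.mem_sorted _ _ _ _).1 h))]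
        have hset : PySem.Set.ofList ((xs ++ [x]).map (fun kv => kv.2)) =
            PySem.Set.ofList (xs.map (fun kv => kv.2)) ++ [x.2] := by
          rw [hofl]
          unfold PySem.Set.add
          rw [if_neg (by simpa [PySem.Set.contains, List.contains_iff_mem] using hx)]
        have hxv : x.2 ∉ xs.map (fun kv => kv.2) := fun h => hx ((PySem.Set.mem_ofList _ _).2 h)
        have hsx : PySem.List.sorted (PySem.Set.ofList (xs.map (fun kv => kv.2)) ++ [x.2]) (fun v => v) true =
            PySem.List.insertBy (fun a b => decide (b < a)) x.2
              (PySem.List.sorted (PySem.Set.ofList (xs.map (fun kv => kv.2))) (fun v => v) true) := by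
          rw [PySem.List.sorted_rev_eq_foldl_insertBy, PySem.List.sorted_rev_eq_foldl_insertBy,
            List.foldl_append, List.foldl_cons, List.foldl_nil]
        rw [hset, hsx]
        refine pv_flatMap_congr_mem _ _ _ (fun w _ => ?_)
        by_cases hwv : w = x.2
        · rw [if_pos hwv, List.filter_append, hwv]
          have : xs.filter (fun kv => kv.2 == x.2) = [] := by
            rw [List.filter_eq_nil_iff]
            intro kv hkv
            simp only [beq_iff_eq]
            intro he
            exact hxv (he ▸ List.mem_map_of_mem (f := fun kv => kv.2) hkv)
          rw [this]
          simp
        · rw [if_neg hwv, List.filter_append]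
          simp [Ne.symm hwv]

-- the branchy grouping step of A is one dict 'modify'
theorem pv_modify_branch_eq (l : PySem.Dict Int (List String)) (kv : String × Int) :
    (if l.contains kv.2 then l else l.insert kv.2 ([] : List String)).modify
        kv.2 [] (fun ks => ks ++ [kv.1]) =
      l.modify kv.2 [] (fun ks => ks ++ [kv.1]) := by
  by_cases hc : l.contains kv.2
  · rw [if_pos hc]
  · rw [if_neg hc]
    unfold PySem.Dict.modify
    rw [PySem.Dict.getD_insert_self, PySem.Dict.insert_insert_self,
      PySem.Dict.getD_of_not_contains l [] (by simpa using hc)]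

-- a fold that inserts pairwise-fresh keys into an empty dict just lists the pairs
theorem pv_items_foldl_insert_pairs (ps : List (String × Int))
    (h : (ps.map (fun p => p.1)).Nodup) :
    (ps.foldl (fun ds q => ds.insert q.1 q.2) PySem.Dict.empty).items = ps := by
  have := PySem.Dict.items_foldl_insert_fresh ps (fun p => p.1) (fun p => p.2)
    PySem.Dict.empty (fun a _ => PySem.Dict.contains_empty _) h
  simpa using this

-- A's nested write-out loop is a single fold over the flattened pair list
theorem pv_foldl_nested_insert (rows : List (Int × List String))
    (init : PySem.Dict String Int) :
    rows.foldl (fun ds p => p.2.foldl (fun ds key => ds.insert key p.1) ds) init =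
      (rows.flatMap (fun p => p.2.map (fun k => (k, p.1)))).foldl
        (fun ds q => ds.insert q.1 q.2) init := by
  induction rows generalizing init with
  | nil => rfl
  | cons p t ih =>
      rw [List.foldl_cons, List.flatMap_cons, List.foldl_append, ih, List.foldl_map]

theorem sortByValues_spec' (d : List (String × Int)) :
    sortByValues d = sortByValues_alt d := by
  unfold sortByValues sortByValues_alt
  dsimp only
  set xs := (PySem.Dict.ofList d).items with hxs
  have hnd : (xs.map (fun p => p.1)).Nodup := PySem.Dict.nodup_keys_ofList d
  -- the grouping dict
  have hfold : xs.foldl (fun l kv =>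
      let l' := if l.contains kv.2 then l else l.insert kv.2 ([] : List String)
      l'.modify kv.2 [] (fun ks => ks ++ [kv.1])) PySem.Dict.empty =
      xs.foldl (fun l kv => l.modify kv.2 [] (fun ks => ks ++ [kv.1])) PySem.Dict.empty :=
    PySem.List.foldl_congr_mem _ _ _ _ (fun acc kv _ => pv_modify_branch_eq acc kv)
  set l := xs.foldl (fun l kv => l.modify kv.2 [] (fun ks => ks ++ [kv.1]))
      (PySem.Dict.empty : PySem.Dict Int (List String)) with hl
  have hgetD : ∀ v : Int, l.getD v [] = (xs.filter (fun kv => kv.2 == v)).map (fun p => p.1) := by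
    intro v
    have : l = (xs.map (fun kv => (kv.2, kv.1))).foldl
        (fun d p => d.modify p.1 [] (fun x => x ++ [p.2])) PySem.Dict.empty := by
      rw [hl, List.foldl_map]
    rw [this, PySem.Dict.getD_foldl_modify_append]
    simp [List.filter_map, Function.comp_def]
  have hkeys : l.keys = PySem.Set.ofList (xs.map (fun kv => kv.2)) := by
    have := PySem.Dict.keys_foldl_modify_key xs (fun kv => kv.2) ([] : List String)
      (fun _ kv => fun ks => ks ++ [kv.1]) PySem.Dict.empty
    rw [hl, this]
    rw [PySem.Set.ofList_eq_foldl]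
    rfl
  set ks := PySem.List.sorted l.keys (fun x => x) true with hks
  -- the rebuilt dict l2
  have hksnd : ks.Nodup := by
    rw [hks, hkeys]
    exact ((PySem.List.sorted_perm _ _ _).nodup_iff).2 (PySem.Set.nodup_ofList _)
  have hl2 : (ks.foldl (fun acc k => acc.insert k (l.getD k [])) PySem.Dict.empty).items =
      ks.map (fun v => (v, l.getD v [])) := by
    have := PySem.Dict.items_foldl_insert_fresh ks (fun v => v) (fun v => l.getD v [])
      PySem.Dict.empty (fun a _ => PySem.Dict.contains_empty _) (by simpa using hksnd)
    simpa using this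
  rw [hfold, ← hks, hl2, pv_foldl_nested_insert]
  -- the flattened pair list is exactly the stable descending sort of xs
  have hP : (ks.map (fun v => (v, l.getD v []))).flatMap
      (fun p => p.2.map (fun k => (k, p.1))) =
      PySem.List.sorted xs (fun kv => kv.2) true := by
    rw [List.flatMap_map, pv_stable_buckets xs, hks, hkeys]
    refine pv_flatMap_congr_mem _ _ _ (fun v _ => ?_)
    rw [hgetD v, List.map_map]
    refine (List.map_congr_left (fun kv hkv => ?_)).trans (List.map_id _)
    have h2 : kv.2 = v := by simpa using List.of_mem_filter hkv
    cases kv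
    simp_all
  rw [hP]
  have hsnd : ((PySem.List.sorted xs (fun kv => kv.2) true).map (fun p => p.1)).Nodup := by
    have hperm : (PySem.List.sorted xs (fun kv => kv.2) true).Perm xs :=
      PySem.List.sorted_perm _ _ _
    exact ((hperm.map (fun p => p.1)).nodup_iff).2 hnd
  rw [pv_items_foldl_insert_pairs _ hsnd]
  -- B side: ofList of a nodup-keyed list lists it back
  unfold PySem.Dict.ofList PySem.Dict.update
  exact (pv_items_foldl_insert_pairs _ hsnd).symm

-- ===== VERDICT (by name: the statement is the Claim_ definition above) =====
theorem sortByValues_spec : Claim_equal_sortByValues := by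
  intro d _
  unfold Spec_sortByValues
  exact sortByValues_spec' d
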